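-- pv_equiv track=rewrite | github.com/alstjrwjd99/BaekJun | 프로그래머스/4/140105. 쌍둥이 빌딩 숲/쌍둥이 빌딩 숲.py | solution
-- ===== SOURCE A (Python) =====
-- MODULAR_ARITHMETIC_DIVIDE_NUMBER = 1000000007
--
-- def solution(n, count):
--     arr = [[0] * (n+1) for _ in range (n+1)]
--     arr[1][1] = 1
--
--     for row in range (2, n+1):
--         prevRow = row - 1
--         for col in range (1,row+1):
--             arr[row][col] = (arr[prevRow][col - 1] + 2 * prevRow * arr[prevRow][col]) % MODULAR_ARITHMETIC_DIVIDE_NUMBER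
--
--     return arr[n][count]
-- ===== SOURCE B (Python) =====
-- MODULAR_ARITHMETIC_DIVIDE_NUMBER = 1000000007
--
-- def mul(a, b):
--     # schoolbook convolution of two coefficient lists, each output entry reduced mod p
--     return [sum(a[i] * b[k - i] for i in range(len(a)) if i <= k < i + len(b))
--             % MODULAR_ARITHMETIC_DIVIDE_NUMBER
--             for k in range(len(a) + len(b) - 1)]
--
-- def prod(lo, hi):
--     # product of the linear factors (x + 2*i) for i = lo .. hi-1, via a divide-and-conquer product tree
--     if hi - lo <= 1:
--         return [2 * lo % MODULAR_ARITHMETIC_DIVIDE_NUMBER, 1]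
--     mid = (lo + hi) // 2
--     return mul(prod(lo, mid), prod(mid, hi))
--
-- def solution(n, count):
--     # answer = coefficient of x^count in x * (x+2)(x+4)...(x+2(n-1)) mod p
--     if n == 1:
--         return [0, 1][count]
--     return ([0] + prod(1, n))[count]
-- ===== Notes on version B (the rewrite author's own statement) =====
-- stated objective: alternative
-- what changed: A fills an (n+1)x(n+1) DP table row by row with the recurrence arr[r][c]=arr[r-1][c-1]+2(r-1)arr[r-1][c]; B instead builds the polynomial x*(x+2)(x+4)...(x+2(n-1)) mod p by a recursive divide-and-conquer product tree whose combine step is a generic polynomial convolution, and reads off the count-th coefficient.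
import Mathlib
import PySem

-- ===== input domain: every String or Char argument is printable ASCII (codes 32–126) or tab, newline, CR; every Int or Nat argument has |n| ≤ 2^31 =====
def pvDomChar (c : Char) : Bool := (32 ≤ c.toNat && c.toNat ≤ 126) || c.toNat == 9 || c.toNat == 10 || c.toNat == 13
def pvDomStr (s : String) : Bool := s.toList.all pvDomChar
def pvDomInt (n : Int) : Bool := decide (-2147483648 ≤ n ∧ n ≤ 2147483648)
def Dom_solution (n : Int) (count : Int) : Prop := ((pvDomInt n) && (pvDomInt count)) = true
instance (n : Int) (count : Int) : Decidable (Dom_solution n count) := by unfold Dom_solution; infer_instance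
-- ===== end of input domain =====

-- B replaces A's row-by-row (n+1)×(n+1) DP table by a divide-and-conquer product tree for the
-- polynomial x·(x+2)(x+4)⋯(x+2(n-1)) mod p, combining subproducts with a generic convolution
-- and reading off one coefficient (an alternative algorithm; not claimed faster).

def MODULAR_ARITHMETIC_DIVIDE_NUMBER : Int := 1000000007

-- ===== PORT A =====
-- arr[i][j] read (indices in range on Pre_, possibly negative final `count` wraps like Python)
def mget (arr : List (List Int)) (i j : Int) : Int :=
  ((PySem.List.pyGet? arr i).bind (fun r => PySem.List.pyGet? r j)).getD 0
-- arr[i][j] = v (i, j are the nonnegative loop indices, so .toNat is exact)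
def mset (arr : List (List Int)) (i j : Nat) (v : Int) : List (List Int) :=
  arr.modify i (fun r => r.set j v)

-- body of `for row in range(2, n+1)` (prevRow = row - 1, inner `for col in range(1, row+1)`)
def outerBody (arr : List (List Int)) (row : Int) : List (List Int) :=
  let prevRow := row - 1
  (PySem.List.pyRange 1 (row+1)).foldl
    (fun arr col =>
      mset arr row.toNat col.toNat
        (PySem.Int.mod (mget arr prevRow (col-1) + 2 * prevRow * mget arr prevRow col)
          MODULAR_ARITHMETIC_DIVIDE_NUMBER))
    arr

def solution (n : Int) (count : Int) : Int :=
  let arr0 : List (List Int) :=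
    List.replicate (n+1).toNat (List.replicate (n+1).toNat 0)
  let arr1 := mset arr0 1 1 1
  let arr2 := (PySem.List.pyRange 2 (n+1)).foldl outerBody arr1
  mget arr2 n count

-- ===== PORT B =====
-- `mul` of Source B: schoolbook convolution, entry k = (Σ_i a[i]*b[k-i], guarded in range) % p
def pmul (a b : List Int) : List Int :=
  (List.range (a.length + b.length - 1)).map (fun k =>
    PySem.Int.mod
      ((List.range a.length).foldl
        (fun s i => if i ≤ k ∧ k < i + b.length then s + a.getD i 0 * b.getD (k - i) 0 else s) 0)
      MODULAR_ARITHMETIC_DIVIDE_NUMBER)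

-- `prod` of Source B: product of the factors (x + 2i), i = lo..hi-1, by a divide-and-conquer tree.
-- The recursion is on a fuel ≥ the interval length (a totality guard only: the guard `hi - lo ≤ 1`
-- is Source B's, and on every call the fuel suffices, so the fuel case is never the answer).
def prodDCF : Nat → Int → Int → List Int
  | 0, lo, _ => [PySem.Int.mod (2 * lo) MODULAR_ARITHMETIC_DIVIDE_NUMBER, 1]
  | (f+1), lo, hi =>
    if hi - lo ≤ 1 then [PySem.Int.mod (2 * lo) MODULAR_ARITHMETIC_DIVIDE_NUMBER, 1]
    else
      pmul (prodDCF f lo (PySem.Int.floordiv (lo + hi) 2))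
           (prodDCF f (PySem.Int.floordiv (lo + hi) 2) hi)

def prodDC (lo hi : Int) : List Int := prodDCF (hi - lo).toNat lo hi

def solution_alt (n : Int) (count : Int) : Int :=
  if n = 1 then (PySem.List.pyGet? ([0, 1] : List Int) count).getD 0
  else (PySem.List.pyGet? ((0 : Int) :: prodDC 1 n) count).getD 0

-- ===== PRECONDITION & SPEC =====
-- Pre_ = exactly where A returns: n ≥ 1 (else arr[1][1] is an IndexError) and count a valid
-- (possibly negative, Python-wrapping) index into row n of length n+1.
def Pre_solution (n : Int) (count : Int) : Prop := 1 ≤ n ∧ -(n+1) ≤ count ∧ count ≤ n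
instance (n : Int) (count : Int) : Decidable (Pre_solution n count) := by
  unfold Pre_solution; infer_instance
def pvWitness_solution : Int × Int := (3, 2)

def Spec_solution (n : Int) (count : Int) (out : Int) : Prop := out = solution_alt n count
instance (n : Int) (count : Int) (out : Int) : Decidable (Spec_solution n count out) := by
  unfold Spec_solution; infer_instance

-- ===== CLAIM (what is proved, stated in full; the proofs are below) =====
def Claim_equal_solution : Prop := ∀ (n : Int) (count : Int), Dom_solution n count → Pre_solution n count → Spec_solution n count (solution n count)

-- ===== LEMMAS AND PROOFS =====

-- ---- the common reference object: A's row r, seen as the coefficient list P r ----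
def stepF (i : Int) (p : List Int) : List Int :=
  (List.zip (0 :: p) (p ++ [0])).map
    (fun ab => PySem.Int.mod (ab.1 + 2 * i * ab.2) MODULAR_ARITHMETIC_DIVIDE_NUMBER)

def P : Nat → List Int
  | 0 => [0, 1]
  | 1 => [0, 1]
  | (r+2) => stepF ((r+1 : Nat) : Int) (P (r+1))

theorem P_succ (m : Nat) (h : 1 ≤ m) : P (m+1) = stepF (m : Int) (P m) := by
  rcases m with _ | r
  · omega
  · rfl

theorem len_stepF (i : Int) (p : List Int) : (stepF i p).length = p.length + 1 := by
  simp [stepF]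

theorem len_P (r : Nat) (h : 1 ≤ r) : (P r).length = r + 1 := by
  induction r with
  | zero => omega
  | succ m ih =>
    rcases Nat.eq_zero_or_pos m with h0 | h1
    · subst h0; rfl
    · rw [P_succ m h1, len_stepF, ih h1]

theorem getD_append_replicate (p : List Int) (k j : Nat) :
    (p ++ List.replicate k (0:Int)).getD j 0 = p.getD j 0 := by
  simp only [List.getD_eq_getElem?_getD, List.getElem?_append]
  split_ifs with h
  · rfl
  · have h1 : p[j]? = none := List.getElem?_eq_none (by omega)
    rw [h1]
    simp [List.getElem?_replicate]
    split_ifs <;> rfl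

theorem getD_of_lt (l : List Int) (j : Nat) (h : j < l.length) : l.getD j 0 = l[j] := by
  rw [List.getD_eq_getElem?_getD, List.getElem?_eq_getElem h, Option.getD_some]

theorem stepF_getD (i : Int) (p : List Int) (j : Nat) (hj : j ≤ p.length) :
    (stepF i p).getD j 0 =
      PySem.Int.mod ((if j = 0 then 0 else p.getD (j-1) 0) + 2 * i * p.getD j 0)
        MODULAR_ARITHMETIC_DIVIDE_NUMBER := by
  have hlen : j < (stepF i p).length := by rw [len_stepF]; omega
  rw [List.getD_eq_getElem?_getD, List.getElem?_eq_getElem hlen, Option.getD_some]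
  simp only [stepF, List.getElem_map, List.getElem_zip]
  congr 1
  rcases j with _ | k
  · rcases p with _ | ⟨a, t⟩ <;> simp
  · simp only [List.getElem_cons_succ, if_neg (Nat.succ_ne_zero k)]
    have hk : k < p.length := by omega
    simp only [Nat.add_sub_cancel]
    rw [getD_of_lt p k hk]
    congr 1
    rcases Nat.lt_or_ge (k+1) p.length with h | h
    · rw [List.getElem_append_left h, getD_of_lt p (k+1) h]
    · have he : k + 1 = p.length := by omega
      rw [List.getElem_append_right (by omega), List.getD_eq_getElem?_getD,
        List.getElem?_eq_none (by omega : p.length ≤ k + 1)]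
      simp [he]

theorem P_head (r : Nat) (h : 1 ≤ r) : (P r).getD 0 0 = 0 := by
  induction r with
  | zero => omega
  | succ m ih =>
    rcases Nat.eq_zero_or_pos m with h0 | h1
    · subst h0; rfl
    · rw [P_succ m h1, stepF_getD _ _ 0 (by omega), if_pos rfl, ih h1]
      have h2 : (0:Int) + 2 * (m:Int) * 0 = 0 := by ring
      rw [h2]
      decide

-- ---- A's table after rows 2..R are done up to column c of row R (c = R : row R complete) ----
def rowMid (N R c r : Nat) : List Int :=
  if 1 ≤ r ∧ r < R then P r ++ List.replicate (N - (r+1)) 0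
  else if r = R then (P R).take (c+1) ++ List.replicate (N - (c+1)) 0
  else List.replicate N 0

def tableMid (N R c : Nat) : List (List Int) := (List.range N).map (rowMid N R c)

theorem len_rowMid (N R c r : Nat) (_hR : R ≤ N - 1) (hr : r < N) (hc : c ≤ R) (h1 : 1 ≤ R) :
    (rowMid N R c r).length = N := by
  unfold rowMid
  split_ifs with ha hb
  · rw [List.length_append, len_P r ha.1, List.length_replicate]; omega
  · rw [List.length_append, List.length_take, len_P R h1, List.length_replicate]; omega
  · exact List.length_replicate

theorem mget_tableMid (N R c : Nat) (i j : Nat) (hi : i < N) (hj : j < N)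
    (hR : R ≤ N - 1) (hc : c ≤ R) (h1 : 1 ≤ R) :
    mget (tableMid N R c) (i : Int) (j : Int) = (rowMid N R c i).getD j 0 := by
  have hlen : (tableMid N R c).length = N := by simp [tableMid]
  have hrow : (tableMid N R c)[i]'(by omega) = rowMid N R c i := by
    simp [tableMid]
  unfold mget
  rw [PySem.List.pyGet?_ofNat _ i (by omega)]
  simp only [Option.bind_some, hrow]
  have hjr : j < (rowMid N R c i).length := by rw [len_rowMid N R c i hR (by omega) hc h1]; omega
  rw [PySem.List.pyGet?_ofNat _ j hjr]
  simp [List.getElem?_eq_getElem hjr]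

theorem base_table (N : Nat) (hN : 2 ≤ N) :
    mset (List.replicate N (List.replicate N 0)) 1 1 1 = tableMid N 1 1 := by
  obtain ⟨k, rfl⟩ : ∃ k, N = k + 2 := ⟨N - 2, by omega⟩
  apply List.ext_getElem
  · simp [mset, tableMid]
  · intro r h1 h2
    have hr : r < k + 2 := by
      have hl : (tableMid (k+2) 1 1).length = k + 2 := by simp [tableMid]
      omega
    simp only [mset, tableMid, List.getElem_modify, List.getElem_replicate,
      List.getElem_map, List.getElem_range]
    unfold rowMid
    rcases eq_or_ne r 1 with h | h
    · subst h
      rw [if_pos rfl, if_neg (show ¬ (1 ≤ 1 ∧ 1 < 1) from by omega), if_pos rfl]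
      simp [P, List.replicate_succ]
    · rw [if_neg (show ¬ (1 = r) from fun hh => h hh.symm),
        if_neg (show ¬ (1 ≤ r ∧ r < 1) from by omega), if_neg h]

theorem table_shift (N R : Nat) (h1 : 1 ≤ R) (hR : R + 1 ≤ N - 1) :
    tableMid N (R+1) 0 = tableMid N R R := by
  apply List.map_congr_left
  intro r hr
  have hrN : r < N := List.mem_range.mp hr
  have hlen : (P (R+1)).length = R + 2 := len_P (R+1) (by omega)
  unfold rowMid
  rcases Nat.lt_trichotomy r (R+1) with h | h | h
  · rcases eq_or_ne r R with hR' | hR'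
    · subst hR'
      rw [if_pos ⟨h1, by omega⟩, if_neg (by omega : ¬ (1 ≤ r ∧ r < r)), if_pos rfl,
        List.take_of_length_le (by rw [len_P r h1])]
    · rcases Nat.lt_or_ge r 1 with h0 | h0
      · rw [if_neg (by omega), if_neg (by omega), if_neg (by omega), if_neg (by omega)]
      · rw [if_pos ⟨h0, by omega⟩, if_pos ⟨h0, by omega⟩]
  · subst h
    rw [if_neg (by omega), if_pos rfl, if_neg (by omega), if_neg (by omega)]
    rcases hP : P (R+1) with _ | ⟨a, t⟩
    · simp [hP] at hlen
    · have ha : a = 0 := by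
        have := P_head (R+1) (by omega)
        rw [hP] at this
        simpa using this
      subst ha
      obtain ⟨j, rfl⟩ : ∃ j, N = j + 1 := ⟨N - 1, by omega⟩
      simp [List.replicate_succ]
  · rw [if_neg (by omega), if_neg (by omega), if_neg (by omega), if_neg (by omega)]

theorem inner_step (N R c : Nat) (h2 : 2 ≤ R) (hR : R ≤ N - 1) (hc : c + 1 ≤ R) :
    mset (tableMid N R c) R (c+1)
      (PySem.Int.mod
        (mget (tableMid N R c) ((R:Int)-1) (((c:Int)+1)-1)
          + 2 * ((R:Int)-1) * mget (tableMid N R c) ((R:Int)-1) ((c:Int)+1))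
        MODULAR_ARITHMETIC_DIVIDE_NUMBER)
      = tableMid N R (c+1) := by
  have hPR : (P R).length = R + 1 := len_P R (by omega)
  have hPp : (P (R-1)).length = R := by
    have := len_P (R-1) (by omega)
    omega
  have hcast : ((R:Int) - 1) = ((R - 1 : Nat) : Int) := by
    have : (1:Nat) ≤ R := by omega
    push_cast [this]; ring
  have hPsucc : P R = stepF (((R-1:Nat)) : Int) (P (R-1)) := by
    have := P_succ (R-1) (by omega)
    rw [show R - 1 + 1 = R from by omega] at this
    exact this
  -- the two table reads
  have hread1 : mget (tableMid N R c) ((R:Int)-1) (((c:Int)+1)-1) = (P (R-1)).getD c 0 := by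
    rw [hcast, show ((c:Int)+1)-1 = ((c:Nat) : Int) from by ring,
      mget_tableMid N R c (R-1) c (by omega) (by omega) hR (by omega) (by omega)]
    unfold rowMid
    rw [if_pos ⟨by omega, by omega⟩, getD_append_replicate]
  have hread2 : mget (tableMid N R c) ((R:Int)-1) ((c:Int)+1) = (P (R-1)).getD (c+1) 0 := by
    rw [hcast, show ((c:Int)+1) = ((c+1 : Nat) : Int) from by push_cast; ring,
      mget_tableMid N R c (R-1) (c+1) (by omega) (by omega) hR (by omega) (by omega)]
    unfold rowMid
    rw [if_pos ⟨by omega, by omega⟩, getD_append_replicate]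
  rw [hread1, hread2]
  have hval : PySem.Int.mod ((P (R-1)).getD c 0 + 2 * ((R:Int)-1) * (P (R-1)).getD (c+1) 0)
      MODULAR_ARITHMETIC_DIVIDE_NUMBER = (P R).getD (c+1) 0 := by
    rw [hPsucc, stepF_getD _ _ (c+1) (by omega), if_neg (Nat.succ_ne_zero c), hcast]
    simp
  rw [hval]
  -- now the write
  apply List.ext_getElem
  · simp [mset, tableMid]
  · intro r h1' h2'
    have hrN : r < N := by simpa [mset, tableMid] using h1'
    simp only [mset, tableMid, List.getElem_map, List.getElem_range, List.getElem_modify]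
    rcases eq_or_ne R r with h | h
    · subst h
      rw [if_pos rfl]
      show (rowMid N R c R).set (c+1) ((P R).getD (c+1) 0) = rowMid N R (c+1) R
      unfold rowMid
      rw [if_neg (show ¬ (1 ≤ R ∧ R < R) from by omega), if_pos rfl,
        if_neg (show ¬ (1 ≤ R ∧ R < R) from by omega), if_pos rfl]
      have hlt : (List.take (c+1) (P R)).length = c + 1 := by
        rw [List.length_take]; omega
      rw [List.set_append, hlt, if_neg (show ¬ (c+1 < c+1) from by omega), Nat.sub_self]
      obtain ⟨k, hk⟩ : ∃ k, N - (c+1) = k + 1 := ⟨N - (c+2), by omega⟩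
      rw [hk, List.replicate_succ, List.set_cons_zero]
      have hc1 : c + 1 < (P R).length := by omega
      have htake : List.take (c+1+1) (P R) = List.take (c+1) (P R) ++ [(P R).getD (c+1) 0] := by
        rw [List.take_add_one, List.getElem?_eq_getElem hc1, getD_of_lt _ _ hc1]
        rfl
      rw [htake, List.append_assoc, List.singleton_append,
        show k = N - (c+1+1) from by omega]
    · rw [if_neg h]
      unfold rowMid
      have h' : r ≠ R := fun hh => h hh.symm
      by_cases hb : 1 ≤ r ∧ r < R
      · simp only [if_pos hb]
      · simp only [if_neg hb, if_neg h']

theorem inner_fold (N R : Nat) (h2 : 2 ≤ R) (hR : R ≤ N - 1) :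
    outerBody (tableMid N R 0) (R : Int) = tableMid N R R := by
  unfold outerBody
  have key : ∀ c : Nat, c ≤ R →
      (PySem.List.pyRange 1 ((c:Int)+1)).foldl
        (fun arr col =>
          mset arr (R:Int).toNat col.toNat
            (PySem.Int.mod (mget arr ((R:Int)-1) (col-1) + 2 * ((R:Int)-1) * mget arr ((R:Int)-1) col)
              MODULAR_ARITHMETIC_DIVIDE_NUMBER))
        (tableMid N R 0) = tableMid N R c := by
    intro c
    induction c with
    | zero =>
      intro _
      norm_num
    | succ c ih =>
      intro hc
      rw [show ((c+1:Nat):Int)+1 = (((c:Int)+1)+1) from by push_cast; ring,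
        PySem.List.pyRange_one_succ_right (by omega : (1:Int) ≤ (c:Int)+1),
        List.foldl_append, ih (by omega)]
      simp only [List.foldl_cons, List.foldl_nil]
      rw [show ((c:Int)+1).toNat = c+1 from by omega, show ((R:Int)).toNat = R from by omega]
      exact inner_step N R c h2 hR hc
  have := key R le_rfl
  simpa using this

theorem outer_fold (N m : Nat) (h1 : 1 ≤ m) (hm : m + 1 ≤ N) (hN : 2 ≤ N) :
    (PySem.List.pyRange 2 ((m:Int)+1)).foldl outerBody (tableMid N 1 1) = tableMid N m m := by
  induction m with
  | zero => omega
  | succ m ih =>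
    rcases Nat.eq_zero_or_pos m with h0 | hm1
    · subst h0
      norm_num
    · rw [show ((m+1:Nat):Int)+1 = (((m:Int)+1)+1) from by push_cast; ring,
        PySem.List.pyRange_one_succ_right (by omega : (2:Int) ≤ (m:Int)+1),
        List.foldl_append, ih hm1 (by omega)]
      simp only [List.foldl_cons, List.foldl_nil]
      rw [← table_shift N m hm1 (by omega),
        show ((m:Int)+1) = ((m+1:Nat):Int) from by push_cast; ring]
      exact inner_fold N (m+1) (by omega) (by omega)

-- ---- B side: the convolution, its entries, and the product tree ----

-- l[j] with Python-style "0 outside" reading at an arbitrary Int index (proof-side view)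
def gIdx (l : List Int) (j : Int) : Int := if 0 ≤ j then l.getD j.toNat 0 else 0

theorem gIdx_natCast (l : List Int) (k : Nat) : gIdx l (k : Int) = l.getD k 0 := by
  simp [gIdx]

theorem gIdx_neg {l : List Int} {j : Int} (h : j < 0) : gIdx l j = 0 := by
  simp [gIdx]; omega

theorem gIdx_ge {l : List Int} {j : Int} (h : (l.length : Int) ≤ j) : gIdx l j = 0 := by
  unfold gIdx
  rw [if_pos (by omega)]
  exact List.getD_eq_default _ _ (by omega)

theorem hMpos : (0:Int) < MODULAR_ARITHMETIC_DIVIDE_NUMBER := by decide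

theorem mod_zero_M : PySem.Int.mod 0 MODULAR_ARITHMETIC_DIVIDE_NUMBER = 0 := by
  rw [PySem.Int.mod_eq_emod_of_pos hMpos, Int.zero_emod]

theorem foldl_if_range (n : Nat) (c : Nat → Prop) [DecidablePred c] (f : Nat → Int) (z : Int) :
    (List.range n).foldl (fun s i => if c i then s + f i else s) z
      = z + ∑ i ∈ Finset.range n, if c i then f i else 0 := by
  induction n generalizing z with
  | zero => simp
  | succ n ih =>
    rw [List.range_succ, List.foldl_append, Finset.sum_range_succ, ih]
    simp only [List.foldl_cons, List.foldl_nil]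
    split_ifs <;> ring

def convSum (a b : List Int) (j : Int) : Int :=
  ∑ i ∈ Finset.range a.length, a.getD i 0 * gIdx b (j - i)

theorem len_pmul (a b : List Int) : (pmul a b).length = a.length + b.length - 1 := by
  simp [pmul]

theorem pmul_ne_nil {a b : List Int} (ha : a ≠ []) (hb : b ≠ []) : pmul a b ≠ [] := by
  have h1 : 0 < a.length := List.length_pos_iff.mpr ha
  have h2 : 0 < b.length := List.length_pos_iff.mpr hb
  apply List.ne_nil_of_length_pos
  rw [len_pmul]; omega

theorem gIdx_pmul (a b : List Int) (ha : a ≠ []) (hb : b ≠ []) (j : Int) :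
    gIdx (pmul a b) j = PySem.Int.mod (convSum a b j) MODULAR_ARITHMETIC_DIVIDE_NUMBER := by
  have hla : 0 < a.length := List.length_pos_iff.mpr ha
  have hlb : 0 < b.length := List.length_pos_iff.mpr hb
  rcases lt_or_ge j 0 with hj | hj
  · rw [gIdx_neg hj]
    have hS : convSum a b j = 0 := by
      apply Finset.sum_eq_zero
      intro i _
      rw [gIdx_neg (by omega : j - (i:Int) < 0), mul_zero]
    rw [hS, mod_zero_M]
  · rcases lt_or_ge j ((a.length + b.length - 1 : Nat) : Int) with hlt | hge
    · -- in-range entry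
      have hk : j = ((j.toNat : Nat) : Int) := by omega
      set k := j.toNat with hkdef
      have hkra : k < a.length + b.length - 1 := by omega
      rw [hk, gIdx_natCast]
      unfold pmul
      rw [PySem.List.getD_map_range _ _ _ _ hkra]
      rw [foldl_if_range, zero_add]
      congr 1
      apply Finset.sum_congr rfl
      intro i hi
      by_cases h1 : i ≤ k
      · have hji : ((k:Int) - i) = ((k - i : Nat) : Int) := by omega
        rw [hji, gIdx_natCast]
        by_cases h2 : k < i + b.length
        · rw [if_pos ⟨h1, h2⟩]
        · rw [if_neg (by omega : ¬(i ≤ k ∧ k < i + b.length)),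
            List.getD_eq_default b _ (by omega), mul_zero]
      · rw [if_neg (by omega : ¬(i ≤ k ∧ k < i + b.length)),
          gIdx_neg (by omega : (k:Int) - (i:Int) < 0), mul_zero]
    · rw [gIdx_ge (by rw [len_pmul]; omega)]
      have hS : convSum a b j = 0 := by
        apply Finset.sum_eq_zero
        intro i hi
        have hi' : i < a.length := Finset.mem_range.mp hi
        rw [gIdx_ge (by omega : (b.length : Int) ≤ j - i), mul_zero]
      rw [hS, mod_zero_M]

theorem gIdx_pair (c t : Int) : gIdx [c, 1] t = if t = 0 then c else if t = 1 then 1 else 0 := by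
  unfold gIdx
  rcases t with n | n
  · rcases n with _ | _ | n
    · simp
    · simp
    · simp
      split_ifs <;> omega
  · simp

theorem sum_indicator (a : List Int) (j c : Int) :
    (∑ i ∈ Finset.range a.length, if (i:Int) = j then a.getD i 0 * c else 0) = gIdx a j * c := by
  by_cases hj : 0 ≤ j ∧ j < (a.length : Int)
  · have hk : j = ((j.toNat : Nat) : Int) := by omega
    rw [show (∑ i ∈ Finset.range a.length, if (i:Int) = j then a.getD i 0 * c else 0)
        = ∑ i ∈ Finset.range a.length, if i = j.toNat then a.getD i 0 * c else 0 from by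
      apply Finset.sum_congr rfl
      intro i _
      congr 1
      simp only [eq_iff_iff]
      omega]
    rw [Finset.sum_ite_eq', if_pos (Finset.mem_range.mpr (by omega))]
    conv_rhs => rw [hk, gIdx_natCast]
  · have hz : gIdx a j = 0 := by
      rcases lt_or_ge j 0 with h | h
      · exact gIdx_neg h
      · exact gIdx_ge (by omega)
    rw [hz, zero_mul]
    apply Finset.sum_eq_zero
    intro i hi
    have : i < a.length := Finset.mem_range.mp hi
    rw [if_neg (by omega)]

theorem convSum_lin (a : List Int) (c j : Int) :
    convSum a [c, 1] j = gIdx a j * c + gIdx a (j - 1) := by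
  unfold convSum
  rw [show (∑ i ∈ Finset.range a.length, a.getD i 0 * gIdx [c, 1] (j - i))
      = ∑ i ∈ Finset.range a.length,
          ((if (i:Int) = j then a.getD i 0 * c else 0) + (if (i:Int) = j - 1 then a.getD i 0 * 1 else 0)) from by
    apply Finset.sum_congr rfl
    intro i _
    rw [gIdx_pair]
    by_cases h0 : j - (i:Int) = 0
    · rw [if_pos h0, if_pos (by omega), if_neg (by omega)]; ring
    · by_cases h1 : j - (i:Int) = 1
      · rw [if_neg h0, if_pos h1, if_neg (by omega), if_pos (by omega)]; ring
      · rw [if_neg h0, if_neg h1, if_neg (by omega), if_neg (by omega)]; ring]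
  rw [Finset.sum_add_distrib, sum_indicator, sum_indicator, mul_one]

theorem gIdx_pmul_lin (a : List Int) (ha : a ≠ []) (c j : Int) :
    gIdx (pmul a [c, 1]) j
      = PySem.Int.mod (gIdx a j * c + gIdx a (j - 1)) MODULAR_ARITHMETIC_DIVIDE_NUMBER := by
  rw [gIdx_pmul a [c, 1] ha (by simp) j, convSum_lin]

-- modular absorption helpers
theorem emod_absorb1 (x y z M : Int) : (x % M * y + z % M) % M = (x * y + z) % M := by
  conv_lhs => rw [Int.add_emod, Int.mul_emod, Int.emod_emod_of_dvd _ dvd_rfl]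
  conv_rhs => rw [Int.add_emod, Int.mul_emod]
  rw [Int.emod_emod_of_dvd _ dvd_rfl]

theorem emod_absorb2 (x y z M : Int) : (x * (y % M) + z) % M = (x * y + z) % M := by
  conv_lhs => rw [Int.add_emod, Int.mul_emod, Int.emod_emod_of_dvd _ dvd_rfl]
  conv_rhs => rw [Int.add_emod, Int.mul_emod]

theorem emod_absorb3 (x y M : Int) : (x * (y % M)) % M = (x * y) % M := by
  conv_lhs => rw [Int.mul_emod, Int.emod_emod_of_dvd _ dvd_rfl]
  conv_rhs => rw [Int.mul_emod]

theorem pmul_assoc_lin (a b : List Int) (ha : a ≠ []) (hb : b ≠ []) (c : Int) :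
    pmul (pmul a b) [c, 1] = pmul a (pmul b [c, 1]) := by
  have hab : pmul a b ≠ [] := pmul_ne_nil ha hb
  have hbc : pmul b [c, 1] ≠ [] := pmul_ne_nil hb (by simp)
  have hla : 0 < a.length := List.length_pos_iff.mpr ha
  have hlb : 0 < b.length := List.length_pos_iff.mpr hb
  apply List.ext_getElem
  · rw [len_pmul, len_pmul, len_pmul, len_pmul]; simp; omega
  · intro t h1 h2
    have hg : ∀ (x : List Int) (ht : t < x.length), x[t] = gIdx x (t : Int) := by
      intro x ht
      rw [gIdx_natCast, getD_of_lt _ _ ht]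
    rw [hg _ h1, hg _ h2]
    rw [gIdx_pmul_lin (pmul a b) hab c, gIdx_pmul a b ha hb, gIdx_pmul a b ha hb,
      gIdx_pmul a (pmul b [c,1]) ha hbc]
    rw [PySem.Int.mod_eq_emod_of_pos hMpos, PySem.Int.mod_eq_emod_of_pos hMpos,
      PySem.Int.mod_eq_emod_of_pos hMpos, PySem.Int.mod_eq_emod_of_pos hMpos]
    rw [emod_absorb1]
    have hr : convSum a (pmul b [c,1]) (t:Int)
        = ∑ i ∈ Finset.range a.length,
            a.getD i 0 * ((gIdx b ((t:Int) - i) * c + gIdx b (((t:Int) - i) - 1))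
              % MODULAR_ARITHMETIC_DIVIDE_NUMBER) := by
      unfold convSum
      apply Finset.sum_congr rfl
      intro i _
      rw [gIdx_pmul_lin b hb c, PySem.Int.mod_eq_emod_of_pos hMpos]
    have hsum : (∑ i ∈ Finset.range a.length,
          a.getD i 0 * (gIdx b ((t:Int) - i) * c + gIdx b (((t:Int) - i) - 1)))
        = convSum a b (t:Int) * c + convSum a b ((t:Int) - 1) := by
      unfold convSum
      rw [Finset.sum_mul, ← Finset.sum_add_distrib]
      apply Finset.sum_congr rfl
      intro i _
      rw [show ((t:Int) - 1) - (i:Int) = ((t:Int) - i) - 1 from by ring]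
      ring
    calc (convSum a b (t:Int) * c + convSum a b ((t:Int)-1)) % MODULAR_ARITHMETIC_DIVIDE_NUMBER
        = (∑ i ∈ Finset.range a.length,
            a.getD i 0 * (gIdx b ((t:Int) - i) * c + gIdx b (((t:Int) - i) - 1)))
            % MODULAR_ARITHMETIC_DIVIDE_NUMBER := by rw [hsum]
      _ = (∑ i ∈ Finset.range a.length,
            (a.getD i 0 * (gIdx b ((t:Int) - i) * c + gIdx b (((t:Int) - i) - 1)))
              % MODULAR_ARITHMETIC_DIVIDE_NUMBER) % MODULAR_ARITHMETIC_DIVIDE_NUMBER :=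
          Finset.sum_int_mod _ _ _
      _ = (∑ i ∈ Finset.range a.length,
            (a.getD i 0 * ((gIdx b ((t:Int) - i) * c + gIdx b (((t:Int) - i) - 1))
              % MODULAR_ARITHMETIC_DIVIDE_NUMBER)) % MODULAR_ARITHMETIC_DIVIDE_NUMBER)
            % MODULAR_ARITHMETIC_DIVIDE_NUMBER := by
          congr 1
          apply Finset.sum_congr rfl
          intro i _
          rw [emod_absorb3]
      _ = (∑ i ∈ Finset.range a.length,
            a.getD i 0 * ((gIdx b ((t:Int) - i) * c + gIdx b (((t:Int) - i) - 1))
              % MODULAR_ARITHMETIC_DIVIDE_NUMBER)) % MODULAR_ARITHMETIC_DIVIDE_NUMBER :=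
          (Finset.sum_int_mod _ _ _).symm
      _ = convSum a (pmul b [c,1]) (t:Int) % MODULAR_ARITHMETIC_DIVIDE_NUMBER := by
          rw [hr]

-- ---- the product tree equals a left-to-right fold of linear factors ----
def linPoly (i : Int) : List Int := [PySem.Int.mod (2 * i) MODULAR_ARITHMETIC_DIVIDE_NUMBER, 1]

theorem linPoly_ne_nil (i : Int) : linPoly i ≠ [] := by simp [linPoly]

def foldMul (a : List Int) (lo hi : Int) : List Int :=
  (PySem.List.pyRange lo hi).foldl (fun p i => pmul p (linPoly i)) a

def Ffold (lo hi : Int) : List Int := foldMul (linPoly lo) (lo + 1) hi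

theorem foldMul_succ (a : List Int) (lo hi : Int) (h : lo ≤ hi) :
    foldMul a lo (hi + 1) = pmul (foldMul a lo hi) (linPoly hi) := by
  unfold foldMul
  rw [PySem.List.pyRange_one_succ_right h, List.foldl_append]
  simp

theorem foldMul_ne_nil (a : List Int) (ha : a ≠ []) (lo hi : Int) : foldMul a lo hi ≠ [] := by
  unfold foldMul
  generalize PySem.List.pyRange lo hi = l
  induction l generalizing a with
  | nil => exact ha
  | cons x xs ih =>
    simp only [List.foldl_cons]
    exact ih _ (pmul_ne_nil ha (linPoly_ne_nil x))

theorem Ffold_ne_nil (lo hi : Int) : Ffold lo hi ≠ [] :=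
  foldMul_ne_nil _ (linPoly_ne_nil lo) _ _

theorem foldMul_split (a : List Int) (lo m hi : Int) (h1 : lo ≤ m) (h2 : m ≤ hi) :
    foldMul a lo hi = foldMul (foldMul a lo m) m hi := by
  unfold foldMul
  rw [PySem.List.pyRange_one_append lo m hi h1 h2, List.foldl_append]

theorem pmul_Ffold (a : List Int) (ha : a ≠ []) (mid : Int) (k : Nat) :
    pmul a (Ffold mid (mid + 1 + k)) = foldMul a mid (mid + 1 + k) := by
  induction k with
  | zero =>
    show pmul a (Ffold mid (mid + 1 + (0:Nat))) = foldMul a mid (mid + 1 + (0:Nat))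
    rw [show mid + 1 + ((0:Nat):Int) = mid + 1 from by push_cast; ring]
    unfold Ffold foldMul
    rw [PySem.List.pyRange_one_eq_nil (le_refl (mid+1)), PySem.List.pyRange_one_singleton]
    simp
  | succ k ih =>
    rw [show mid + 1 + ((k+1:Nat):Int) = (mid + 1 + (k:Nat)) + 1 from by push_cast; ring]
    rw [foldMul_succ a mid _ (by omega)]
    unfold Ffold
    rw [foldMul_succ (linPoly mid) (mid+1) _ (by omega)]
    rw [show foldMul (linPoly mid) (mid + 1) (mid + 1 + (k:Nat)) = Ffold mid (mid + 1 + (k:Nat)) from rfl]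
    rw [show linPoly (mid + 1 + (k:Nat))
        = [PySem.Int.mod (2 * (mid + 1 + (k:Nat))) MODULAR_ARITHMETIC_DIVIDE_NUMBER, 1] from rfl]
    rw [← pmul_assoc_lin a (Ffold mid (mid + 1 + (k:Nat))) ha (Ffold_ne_nil _ _), ih]

theorem prodDCF_eq_Ffold (d : Nat) : ∀ lo hi : Int, (hi - lo).toNat ≤ d → lo < hi →
    prodDCF d lo hi = Ffold lo hi := by
  induction d with
  | zero => intro lo hi h hlt; omega
  | succ d ih =>
    intro lo hi h hlt
    rw [prodDCF]
    by_cases hb : hi - lo ≤ 1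
    · rw [if_pos hb]
      have he : hi = lo + 1 := by omega
      subst he
      unfold Ffold foldMul
      rw [PySem.List.pyRange_one_eq_nil (le_refl (lo+1))]
      rfl
    · rw [if_neg hb]
      have hm1 : lo + 1 ≤ PySem.Int.floordiv (lo + hi) 2 :=
        (PySem.Int.le_floordiv_iff_mul_le (by omega)).mpr (by omega)
      have hm2 : PySem.Int.floordiv (lo + hi) 2 < hi :=
        (PySem.Int.floordiv_lt_iff_lt_mul (by omega)).mpr (by omega)
      set mid := PySem.Int.floordiv (lo + hi) 2 with hmid
      rw [ih lo mid (by omega) (by omega), ih mid hi (by omega) (by omega)]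
      obtain ⟨k, hk⟩ : ∃ k : Nat, hi = mid + 1 + (k:Int) := ⟨(hi - mid - 1).toNat, by omega⟩
      rw [hk, pmul_Ffold (Ffold lo mid) (Ffold_ne_nil _ _) mid k]
      unfold Ffold
      rw [foldMul_split (linPoly lo) (lo+1) mid (mid + 1 + (k:Int)) (by omega) (by omega)]

-- ---- bridge: one linear-factor multiplication is one DP row step ----
theorem cons_pmul_lin (q : List Int) (hq : q ≠ []) (i : Int) :
    (0:Int) :: pmul q (linPoly i) = stepF i ((0:Int) :: q) := by
  apply List.ext_getElem
  · rw [List.length_cons, len_pmul, len_stepF]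
    simp [linPoly]
  · intro t h1 h2
    have hlq : 0 < q.length := List.length_pos_iff.mpr hq
    have ht : t < q.length + 2 := by
      rw [List.length_cons, len_pmul] at h1
      simp [linPoly] at h1
      omega
    have hstep := stepF_getD i ((0:Int) :: q) t (by simp; omega)
    rw [← getD_of_lt _ _ h1, ← getD_of_lt _ _ h2, hstep]
    rcases t with _ | s
    · simp [mod_zero_M]
    · rw [List.getD_cons_succ]
      have hs : ((0:Int) :: q).getD s 0 = gIdx q ((s:Int) - 1) := by
        rcases s with _ | u
        · rw [List.getD_cons_zero, gIdx_neg (by omega)]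
        · rw [List.getD_cons_succ, show ((u+1:Nat):Int) - 1 = ((u:Nat):Int) from by push_cast; ring,
            gIdx_natCast]
      have hs1 : ((0:Int) :: q).getD (s+1) 0 = gIdx q (s:Int) := by
        rw [List.getD_cons_succ, gIdx_natCast]
      rw [if_neg (Nat.succ_ne_zero s), Nat.add_sub_cancel, hs, hs1]
      have hl : (pmul q (linPoly i)).getD s 0 = gIdx (pmul q (linPoly i)) (s:Int) := by
        rw [gIdx_natCast]
      rw [hl]
      unfold linPoly
      rw [gIdx_pmul_lin q hq _ (s:Int)]
      rw [PySem.Int.mod_eq_emod_of_pos hMpos, PySem.Int.mod_eq_emod_of_pos hMpos,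
        PySem.Int.mod_eq_emod_of_pos hMpos]
      rw [emod_absorb2]
      congr 1
      ring

-- ---- B's full product equals A's last row ----
theorem cons_Ffold (m : Nat) (hm : 1 ≤ m) : (0:Int) :: Ffold 1 ((m:Int) + 1) = P (m+1) := by
  induction m with
  | zero => omega
  | succ m ih =>
    rcases Nat.eq_zero_or_pos m with h0 | hm1
    · subst h0
      decide
    · rw [show ((m+1:Nat):Int) + 1 = ((m:Int) + 1) + 1 from by push_cast; ring]
      unfold Ffold
      rw [foldMul_succ (linPoly 1) (1+1) ((m:Int)+1) (by omega)]
      rw [show foldMul (linPoly 1) (1+1) ((m:Int)+1) = Ffold 1 ((m:Int)+1) from rfl]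
      rw [cons_pmul_lin (Ffold 1 ((m:Int)+1)) (Ffold_ne_nil _ _) ((m:Int)+1), ih hm1]
      rw [show ((m:Int) + 1) = ((m+1:Nat):Int) from by push_cast; ring]
      exact (P_succ (m+1) (by omega)).symm

-- ---- A's value as a read of P ----
theorem A_val (m : Nat) (hm : 1 ≤ m) (count : Int) :
    solution (m:Int) count = (PySem.List.pyGet? (P m) count).getD 0 := by
  show mget ((PySem.List.pyRange 2 ((m:Int)+1)).foldl outerBody
      (mset (List.replicate ((m:Int)+1).toNat (List.replicate ((m:Int)+1).toNat 0)) 1 1 1))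
      (m:Int) count = _
  have hN : ((m:Int)+1).toNat = m + 1 := by omega
  rw [hN]
  have hbase : mset (List.replicate (m+1) (List.replicate (m+1) 0)) 1 1 1 = tableMid (m+1) 1 1 :=
    base_table (m+1) (by omega)
  rw [hbase, outer_fold (m+1) m hm (by omega) (by omega)]
  have hlen : (tableMid (m+1) m m).length = m + 1 := by simp [tableMid]
  have hrow : (tableMid (m+1) m m)[m]'(by omega) = rowMid (m+1) m m m := by
    simp [tableMid]
  have hrowP : rowMid (m+1) m m m = P m := by
    unfold rowMid
    rw [if_neg (by omega : ¬ (1 ≤ m ∧ m < m)), if_pos rfl,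
      List.take_of_length_le (by rw [len_P m hm]),
      show m + 1 - (m + 1) = 0 from by omega]
    simp
  unfold mget
  rw [PySem.List.pyGet?_ofNat _ m (by omega)]
  simp only [Option.bind_some]
  rw [hrow, hrowP]

-- ===== VERDICT (by name: the statement is the Claim_ definition above) =====
theorem solution_spec : Claim_equal_solution := by
  intro n count _ hpre
  obtain ⟨h1, _, _⟩ := hpre
  unfold Spec_solution
  obtain ⟨m, rfl, hm⟩ : ∃ m : Nat, n = (m:Int) ∧ 1 ≤ m :=
    ⟨n.toNat, (Int.toNat_of_nonneg (by omega)).symm, by omega⟩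
  rw [A_val m hm count]
  unfold solution_alt
  by_cases hm1 : (m:Int) = 1
  · rw [if_pos hm1]
    have : m = 1 := by omega
    subst this
    rfl
  · rw [if_neg hm1]
    have hm2 : 2 ≤ m := by omega
    have h3 : prodDC 1 (m:Int) = Ffold 1 (m:Int) :=
      prodDCF_eq_Ffold ((m:Int) - 1).toNat 1 (m:Int) (by omega) (by omega)
    have h4 : (0:Int) :: Ffold 1 (m:Int) = P m := by
      have := cons_Ffold (m-1) (by omega)
      rw [show ((m-1:Nat):Int) + 1 = (m:Int) from by omega,
        show m - 1 + 1 = m from by omega] at this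
      exact this
    rw [h3, ← h4]
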